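-- pv_equiv track=rewrite | github.com/Harish-1828/crypto | playfair.py | find
-- ===== SOURCE A (Python) =====
-- def find(ch1, ch2, matrix):
--     d = dict()
--     d[ch1] = []
--     d[ch2] = []
--     for i in range(len(matrix)):
--         for j in range(len(matrix[i])):
--             if matrix[i][j] == ch1 or matrix[i][j] == ch2:
--                 d[matrix[i][j]].append([i, j])
--     return d
-- ===== SOURCE B (Python) =====
-- def find(ch1, ch2, matrix):
--     return {c: [[i, j] for i, row in enumerate(matrix) for j, x in enumerate(row) if x == c]
--             for c in (ch1, ch2)}
-- ===== Notes on version B (the rewrite author's own statement) =====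
-- stated objective: simpler
-- what changed: Replaces A's single index-driven nested scan that branches on either target and mutates a pre-seeded dict in place by a dict comprehension that runs one independent enumerate-based scan per target character.
import Mathlib
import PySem

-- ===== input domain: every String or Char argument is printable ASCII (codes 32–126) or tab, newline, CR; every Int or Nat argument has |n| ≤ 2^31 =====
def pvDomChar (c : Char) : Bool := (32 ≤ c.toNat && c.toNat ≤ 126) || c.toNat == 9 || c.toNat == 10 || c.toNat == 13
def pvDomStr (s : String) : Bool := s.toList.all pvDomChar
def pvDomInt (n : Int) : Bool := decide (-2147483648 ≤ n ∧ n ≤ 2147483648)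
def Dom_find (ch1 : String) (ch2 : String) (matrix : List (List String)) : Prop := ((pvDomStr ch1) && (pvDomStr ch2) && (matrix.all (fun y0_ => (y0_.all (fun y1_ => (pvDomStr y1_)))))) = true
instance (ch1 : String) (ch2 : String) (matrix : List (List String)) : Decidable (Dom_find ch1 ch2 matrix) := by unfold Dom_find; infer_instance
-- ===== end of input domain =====

-- B replaces A's single index-driven scan that branches on either target and mutates a dict in
-- place by a dict comprehension doing one independent enumerate-scan per target character (simpler).

-- ===== PORT A =====
-- literal port of A: dict seeded with ch1/ch2, nested index loops, conditional append
def find (ch1 : String) (ch2 : String) (matrix : List (List String)) : List (String × List (List Int)) :=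
  let d : PySem.Dict String (List (List Int)) := PySem.Dict.empty
  let d := d.insert ch1 []
  let d := d.insert ch2 []
  let d := (PySem.List.pyRange 0 (matrix.length : Int) 1).foldl (fun d i =>
      (PySem.List.pyRange 0 ((PySem.List.pyGetD matrix i []).length : Int) 1).foldl (fun d j =>
        if PySem.List.pyGetD (PySem.List.pyGetD matrix i []) j "" == ch1 ||
           PySem.List.pyGetD (PySem.List.pyGetD matrix i []) j "" == ch2 then
          d.modify (PySem.List.pyGetD (PySem.List.pyGetD matrix i []) j "") []
            (· ++ [[i, j]])
        else d) d) d
  d.items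

-- ===== PORT B =====
-- one row-major enumerate scan collecting the positions of a single character c
def pyPositions (c : String) (matrix : List (List String)) : List (List Int) :=
  (PySem.List.enumerate matrix).flatMap (fun p =>
    ((PySem.List.enumerate p.2).filter (fun q => q.2 == c)).map (fun q => [p.1, q.1]))

-- dict comprehension {c: positions(c) for c in (ch1, ch2)}
def find_alt (ch1 : String) (ch2 : String) (matrix : List (List String)) : List (String × List (List Int)) :=
  (([ch1, ch2]).foldl (fun d c => d.insert c (pyPositions c matrix))
      (PySem.Dict.empty : PySem.Dict String (List (List Int)))).items

-- ===== PRECONDITION & SPEC =====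
def Spec_find (ch1 : String) (ch2 : String) (matrix : List (List String)) (out : List (String × List (List Int))) : Prop := out = find_alt ch1 ch2 matrix
instance (ch1 : String) (ch2 : String) (matrix : List (List String)) (out : List (String × List (List Int))) : Decidable (Spec_find ch1 ch2 matrix out) := by unfold Spec_find; infer_instance

-- ===== CLAIM (what is proved, stated in full; the proofs are below) =====
def Claim_equal_find : Prop := ∀ (ch1 : String) (ch2 : String) (matrix : List (List String)), Dom_find ch1 ch2 matrix → Spec_find ch1 ch2 matrix (find ch1 ch2 matrix)

-- ===== LEMMAS AND PROOFS =====

-- row-major flattening of the matrix with coordinates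
def pvL (matrix : List (List String)) : List (Int × Int × String) :=
  (PySem.List.enumerate matrix).flatMap (fun p =>
    (PySem.List.enumerate p.2).map (fun q => (p.1, q.1, q.2)))

-- the (key, appended-value) pairs A's loop actually touches, in order
def pvPL (ch1 ch2 : String) (matrix : List (List String)) : List (String × List Int) :=
  ((pvL matrix).filter (fun t => t.2.2 == ch1 || t.2.2 == ch2)).map
    (fun t => (t.2.2, [t.1, t.2.1]))

theorem pv_foldl_flatMap {α β γ : Type} (l : List α) (f : α → List β) (g : γ → β → γ) (init : γ) :
    (l.flatMap f).foldl g init = l.foldl (fun a x => (f x).foldl g a) init := by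
  induction l generalizing init with
  | nil => rfl
  | cons x xs ih => simp [List.flatMap_cons, List.foldl_append, ih]

theorem pv_guard_fold (ch1 ch2 : String) (l : List (Int × Int × String))
    (d : PySem.Dict String (List (List Int))) :
    l.foldl (fun d t =>
        if t.2.2 == ch1 || t.2.2 == ch2 then d.modify t.2.2 [] (· ++ [[t.1, t.2.1]]) else d) d
      = (((l.filter (fun t => t.2.2 == ch1 || t.2.2 == ch2)).map
            (fun t => (t.2.2, [t.1, t.2.1]))).foldl
          (fun d p => d.modify p.1 [] (· ++ [p.2])) d) := by
  induction l generalizing d with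
  | nil => rfl
  | cons t ts ih =>
    simp only [List.foldl_cons, List.filter_cons]
    by_cases h : (t.2.2 == ch1 || t.2.2 == ch2) = true
    · simp only [h, if_true, List.map_cons, List.foldl_cons]
      exact ih _
    · simp only [h]
      exact ih _

theorem pv_foldl_pyRange_enum {α γ : Type} (xs : List α) (dflt : α) (G : γ → Int → α → γ)
    (init : γ) :
    (PySem.List.pyRange 0 (xs.length : Int) 1).foldl
        (fun a i => G a i (PySem.List.pyGetD xs i dflt)) init
      = (PySem.List.enumerate xs).foldl (fun a p => G a p.1 p.2) init := by
  rw [PySem.List.enumerate_eq_map_pyRange xs dflt, List.foldl_map]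
  simp [PySem.List.len_eq]

theorem pv_find_eq (ch1 ch2 : String) (matrix : List (List String)) :
    find ch1 ch2 matrix
      = ((pvPL ch1 ch2 matrix).foldl (fun d p => d.modify p.1 [] (· ++ [p.2]))
          ((PySem.Dict.empty.insert ch1 []).insert ch2 [])).items := by
  unfold find
  dsimp only
  rw [show (PySem.List.pyRange 0 (matrix.length : Int) 1).foldl (fun d i =>
      (PySem.List.pyRange 0 ((PySem.List.pyGetD matrix i []).length : Int) 1).foldl (fun d j =>
        if PySem.List.pyGetD (PySem.List.pyGetD matrix i []) j "" == ch1 ||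
           PySem.List.pyGetD (PySem.List.pyGetD matrix i []) j "" == ch2 then
          d.modify (PySem.List.pyGetD (PySem.List.pyGetD matrix i []) j "") []
            (· ++ [[i, j]])
        else d) d) ((PySem.Dict.empty.insert ch1 []).insert ch2 [])
      = (PySem.List.enumerate matrix).foldl (fun d p =>
          (PySem.List.pyRange 0 ((p.2).length : Int) 1).foldl (fun d j =>
            if PySem.List.pyGetD p.2 j "" == ch1 || PySem.List.pyGetD p.2 j "" == ch2 then
              d.modify (PySem.List.pyGetD p.2 j "") [] (· ++ [[p.1, j]])
            else d) d) ((PySem.Dict.empty.insert ch1 []).insert ch2 [])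
    from pv_foldl_pyRange_enum matrix []
      (fun (d : PySem.Dict String (List (List Int))) (i : Int) (row : List String) => (PySem.List.pyRange 0 ((row).length : Int) 1).foldl (fun d j =>
        if PySem.List.pyGetD row j "" == ch1 || PySem.List.pyGetD row j "" == ch2 then
          d.modify (PySem.List.pyGetD row j "") [] (· ++ [[i, j]])
        else d) d) _]
  have hinner : (fun (d : PySem.Dict String (List (List Int))) (p : Int × List String) =>
      (PySem.List.pyRange 0 ((p.2).length : Int) 1).foldl (fun d j =>
        if PySem.List.pyGetD p.2 j "" == ch1 || PySem.List.pyGetD p.2 j "" == ch2 then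
          d.modify (PySem.List.pyGetD p.2 j "") [] (· ++ [[p.1, j]])
        else d) d)
    = (fun d p => (PySem.List.enumerate p.2).foldl (fun d q =>
        if q.2 == ch1 || q.2 == ch2 then d.modify q.2 [] (· ++ [[p.1, q.1]]) else d) d) := by
    funext d p
    exact pv_foldl_pyRange_enum p.2 ""
      (fun d j x => if x == ch1 || x == ch2 then d.modify x [] (· ++ [[p.1, j]]) else d) d
  rw [hinner]
  rw [show ((PySem.List.enumerate matrix).foldl (fun d p =>
        (PySem.List.enumerate p.2).foldl (fun d q =>
          if q.2 == ch1 || q.2 == ch2 then d.modify q.2 [] (· ++ [[p.1, q.1]]) else d) d)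
        ((PySem.Dict.empty.insert ch1 []).insert ch2 []))
      = ((pvL matrix).foldl (fun d t =>
          if t.2.2 == ch1 || t.2.2 == ch2 then d.modify t.2.2 [] (· ++ [[t.1, t.2.1]]) else d)
          ((PySem.Dict.empty.insert ch1 []).insert ch2 []))
    from by
      rw [pvL, pv_foldl_flatMap]
      have : (fun (d : PySem.Dict String (List (List Int))) (p : Int × List String) =>
          ((PySem.List.enumerate p.2).map (fun q => (p.1, q.1, q.2))).foldl
            (fun d t => if t.2.2 == ch1 || t.2.2 == ch2 then
              d.modify t.2.2 [] (· ++ [[t.1, t.2.1]]) else d) d)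
        = (fun d p => (PySem.List.enumerate p.2).foldl (fun d q =>
            if q.2 == ch1 || q.2 == ch2 then d.modify q.2 [] (· ++ [[p.1, q.1]]) else d) d) := by
        funext d p
        rw [List.foldl_map]
      rw [this]]
  rw [pv_guard_fold]
  rfl

theorem pv_positions_eq (c ch1 ch2 : String) (matrix : List (List String))
    (hc : c = ch1 ∨ c = ch2) :
    ((pvPL ch1 ch2 matrix).filter (fun p => p.1 == c)).map (·.2) = pyPositions c matrix := by
  unfold pvPL
  rw [List.filter_map, List.filter_filter, List.map_map]
  have hfun : (fun (a : Int × Int × String) =>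
      ((fun (p : String × List Int) => p.1 == c) ∘ fun (t : Int × Int × String) =>
        (t.2.2, [t.1, t.2.1])) a && (a.2.2 == ch1 || a.2.2 == ch2))
      = (fun (a : Int × Int × String) => a.2.2 == c) := by
    funext t
    by_cases h : t.2.2 = c
    · rcases hc with rfl | rfl <;> simp [Function.comp, h]
    · simp [Function.comp, h]
  rw [hfun]
  unfold pvL pyPositions
  rw [List.filter_flatMap, List.map_flatMap]
  refine List.flatMap_congr ?_
  intro p _
  rw [List.filter_map, List.map_map]
  rfl

theorem pv_keys_stay (ch1 ch2 : String) (matrix : List (List String)) :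
    ((pvPL ch1 ch2 matrix).foldl (fun d p => d.modify p.1 [] (· ++ [p.2]))
        ((PySem.Dict.empty.insert ch1 []).insert ch2 [])).keys
      = ((PySem.Dict.empty.insert ch1 []).insert ch2 []
          : PySem.Dict String (List (List Int))).keys := by
  rw [show ((pvPL ch1 ch2 matrix).foldl (fun d p => d.modify p.1 [] (· ++ [p.2]))
        ((PySem.Dict.empty.insert ch1 []).insert ch2 [])).keys
      = PySem.Set.update ((PySem.Dict.empty.insert ch1 []).insert ch2 []
          : PySem.Dict String (List (List Int))).keys ((pvPL ch1 ch2 matrix).map Prod.fst)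
    from PySem.Dict.keys_foldl_modify_key _ Prod.fst [] (fun _ p => (· ++ [p.2])) _]
  rw [PySem.Set.update_eq_append_filter]
  have h : (PySem.Set.ofList ((pvPL ch1 ch2 matrix).map Prod.fst)).filter
      (fun y => !(PySem.Set.contains (((PySem.Dict.empty.insert ch1 []).insert ch2 []
        : PySem.Dict String (List (List Int))).keys) y)) = [] := by
    apply List.filter_eq_nil_iff.mpr
    intro x hx
    have hx' : x ∈ (pvPL ch1 ch2 matrix).map Prod.fst := (PySem.Set.mem_ofList _ _).mp hx
    have hx2 : x = ch1 ∨ x = ch2 := by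
      rcases List.mem_map.mp hx' with ⟨p, hp, rfl⟩
      rcases List.mem_map.mp ((by exact hp) : p ∈ ((pvL matrix).filter
          (fun t => t.2.2 == ch1 || t.2.2 == ch2)).map (fun t => (t.2.2, [t.1, t.2.1]))) with
        ⟨t, ht, rfl⟩
      have := List.of_mem_filter ht
      rcases Bool.or_eq_true_iff.mp this with h' | h'
      · exact Or.inl (eq_of_beq h')
      · exact Or.inr (eq_of_beq h')
    have hmem : x ∈ ((PySem.Dict.empty.insert ch1 []).insert ch2 []
        : PySem.Dict String (List (List Int))).keys := by
      rcases hx2 with rfl | rfl <;>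
        simp [PySem.Dict.mem_keys_insert, PySem.Dict.keys_empty]
    simp only [Bool.not_eq_true', Bool.not_eq_false]
    exact (PySem.Set.contains_iff _ _).mpr hmem
  rw [h, List.append_nil]

theorem pv_keys2 (a b : String) (v w : List (List Int)) :
    ((PySem.Dict.empty.insert a v).insert b w).keys = if b = a then [a] else [a, b] := by
  by_cases h : b = a
  · subst h
    rw [PySem.Dict.keys_insert_of_contains _ _
        (by simp),
      PySem.Dict.keys_insert_of_not_contains _ _ (PySem.Dict.contains_empty _),
      PySem.Dict.keys_empty]
    simp
  · rw [PySem.Dict.keys_insert_of_not_contains _ _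
        (by simp [PySem.Dict.contains_insert, PySem.Dict.contains_empty, h]),
      PySem.Dict.keys_insert_of_not_contains _ _ (PySem.Dict.contains_empty _),
      PySem.Dict.keys_empty]
    simp [h]

-- ===== VERDICT (by name: the statement is the Claim_ definition above) =====
theorem find_spec : Claim_equal_find := by
  intro ch1 ch2 matrix _
  unfold Spec_find
  rw [pv_find_eq]
  have hnd0 : (((PySem.Dict.empty.insert ch1 []).insert ch2 [])
      : PySem.Dict String (List (List Int))).keys.Nodup :=
    PySem.Dict.nodup_keys_insert _ _ _
      (PySem.Dict.nodup_keys_insert _ _ _ (by rw [PySem.Dict.keys_empty]; exact List.nodup_nil))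
  have hnd : ((pvPL ch1 ch2 matrix).foldl (fun d p => d.modify p.1 [] (· ++ [p.2]))
      ((PySem.Dict.empty.insert ch1 []).insert ch2 [])).keys.Nodup :=
    PySem.Dict.nodup_keys_foldl_modify_key (pvPL ch1 ch2 matrix) Prod.fst []
      (fun _ p => (· ++ [p.2])) _ hnd0
  rw [PySem.Dict.items_eq_map_keys _ hnd ([] : List (List Int)), pv_keys_stay]
  have hndB : ((PySem.Dict.empty.insert ch1 (pyPositions ch1 matrix)).insert ch2
      (pyPositions ch2 matrix)).keys.Nodup :=
    PySem.Dict.nodup_keys_insert _ _ _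
      (PySem.Dict.nodup_keys_insert _ _ _ (by rw [PySem.Dict.keys_empty]; exact List.nodup_nil))
  have hB : find_alt ch1 ch2 matrix = ((PySem.Dict.empty.insert ch1 (pyPositions ch1 matrix)).insert
      ch2 (pyPositions ch2 matrix)).items := rfl
  rw [hB, PySem.Dict.items_eq_map_keys _ hndB ([] : List (List Int))]
  have hget : ∀ k, k = ch1 ∨ k = ch2 →
      ((pvPL ch1 ch2 matrix).foldl (fun d p => d.modify p.1 [] (· ++ [p.2]))
        ((PySem.Dict.empty.insert ch1 []).insert ch2 [])).getD k [] = pyPositions k matrix := by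
    intro k hk
    rw [PySem.Dict.getD_foldl_modify_append, pv_positions_eq k ch1 ch2 matrix hk]
    simp [PySem.Dict.getD_insert, PySem.Dict.getD_empty]
  rw [pv_keys2, pv_keys2]
  by_cases h : ch2 = ch1
  · subst h
    have h1 := hget ch2 (Or.inl rfl)
    simp [h1, PySem.Dict.getD_insert]
  · have h1 := hget ch1 (Or.inl rfl)
    have h2 := hget ch2 (Or.inr rfl)
    simp [h, h1, h2, PySem.Dict.getD_insert, Ne.symm h]
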